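-- pv_equiv track=rewrite | github.com/j-d-0630/AtCoder | 競プロ典型 90 問/67_Base_8_to_9().py | cal9
-- ===== SOURCE A (Python) =====
-- def cal9(n:int) -> str:
--   tmp9 = ""
--   for i in range(20):
--     tmp9 += str(n // 9**(19-i))
--     n = n % 9**(19-i)
--
--   tmp9 = list(tmp9)
--   for i in range(len(tmp9)):
--     if tmp9[i] == "8":
--       tmp9[i] = "5"
--
--   tmp9_2 = ""
--   for s in tmp9:
--     tmp9_2 += s
--
--   return tmp9_2
-- ===== SOURCE B (Python) =====
-- def cal9(n: int) -> str:
--     high, rest = divmod(n, 9 ** 19)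
--     out = []
--     while rest:
--         rest, d = divmod(rest, 9)
--         out.append('5' if d == 8 else str(d))
--     return str(high) + '0' * (19 - len(out)) + ''.join(reversed(out))
-- ===== Notes on version B (the rewrite author's own statement) =====
-- stated objective: simpler
-- what changed: B replaces A's fixed 20-iteration MSB-first loop dividing by explicit powers 9**(19-i) and its two post-passes (per-index 8-to-5 rewrite, then re-join) by one divmod(n,9**19) split plus an LSB-first divmod-by-9 loop that emits the already-substituted digit, reversed and left-padded to width 19.
import Mathlib
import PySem

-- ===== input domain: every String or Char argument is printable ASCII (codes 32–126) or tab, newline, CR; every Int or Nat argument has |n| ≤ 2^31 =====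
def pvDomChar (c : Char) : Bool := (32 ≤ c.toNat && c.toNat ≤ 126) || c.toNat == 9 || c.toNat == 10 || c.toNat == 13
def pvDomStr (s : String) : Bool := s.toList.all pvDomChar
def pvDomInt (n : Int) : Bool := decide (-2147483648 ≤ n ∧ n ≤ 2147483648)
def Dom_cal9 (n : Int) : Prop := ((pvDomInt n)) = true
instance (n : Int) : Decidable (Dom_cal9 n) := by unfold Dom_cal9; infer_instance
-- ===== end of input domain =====

-- B replaces A's 20-iteration divide-by-explicit-powers (MSB-first) digit loop and the two
-- post-passes (8→5 rewrite pass and re-join pass) by one LSB-first divmod loop that emits the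
-- already-substituted digit, plus left-padding; objective: simpler (same return value on Dom).

-- ===== PORT A =====
-- body of A's first loop: tmp9 += str(n // 9**(19-i)); n = n % 9**(19-i)
def cal9Body1 (st : String × Int) (i : Int) : String × Int :=
  (st.1 ++ PySem.Int.toStr (PySem.Int.floordiv st.2 ((9:Int) ^ (19 - i).toNat)),
   PySem.Int.mod st.2 ((9:Int) ^ (19 - i).toNat))

-- body of A's second loop: if tmp9[i] == "8": tmp9[i] = "5"
def cal9Body2 (l : List Char) (i : Int) : List Char :=
  if PySem.List.pyGetD l i ' ' = '8' then l.set i.toNat '5' else l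

def cal9 (n : Int) : String :=
  let p := (PySem.List.pyRange 0 20 1).foldl cal9Body1 ("", n)
  let tmp9 := p.1.toList
  let tmp9' := (PySem.List.pyRange 0 (tmp9.length : Int) 1).foldl cal9Body2 tmp9
  tmp9'.foldl (fun (acc : String) (c : Char) => acc ++ String.ofList [c]) ""

-- ===== PORT B =====
-- B's while loop: while rest: rest, d = divmod(rest, 9); out.append('5' if d == 8 else str(d))
-- (rest is always ≥ 0 here; the 0 < r guard only makes the recursion total)
def cal9AltLoop (r : Int) : List String :=
  if _h : 0 < r then
    (if PySem.Int.mod r 9 = 8 then "5" else PySem.Int.toStr (PySem.Int.mod r 9)) ::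
      cal9AltLoop (PySem.Int.floordiv r 9)
  else []
termination_by r.toNat
decreasing_by
  rw [PySem.Int.floordiv_eq_ediv_of_pos (by norm_num)]; omega

def cal9_alt (n : Int) : String :=
  let high := PySem.Int.floordiv n ((9:Int) ^ (19:Nat))
  let rest := PySem.Int.mod n ((9:Int) ^ (19:Nat))
  let out := cal9AltLoop rest
  PySem.Int.toStr high ++ String.ofList (List.replicate ((19 - (out.length : Int)).toNat) '0')
    ++ PySem.Str.join "" out.reverse

-- ===== PRECONDITION & SPEC =====
def Spec_cal9 (n : Int) (out : String) : Prop := out = cal9_alt n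
instance (n : Int) (out : String) : Decidable (Spec_cal9 n out) := by unfold Spec_cal9; infer_instance

-- ===== CLAIM (what is proved, stated in full; the proofs are below) =====
def Claim_equal_cal9 : Prop := ∀ (n : Int), Dom_cal9 n → Spec_cal9 n (cal9 n)

-- ===== LEMMAS AND PROOFS =====

-- digit character, the 8→5 substitution, B's digit string
def dChar (k : Nat) : Char := Char.ofNat (48 + k)
def swapC (c : Char) : Char := if c = '8' then '5' else c
def dStr (k : Nat) : String := if k = 8 then "5" else PySem.Int.toStr (k : Int)

-- MSB-first digits of m, width w (what A's first loop emits after the leading field)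
def msb : Nat → Nat → List Nat
  | 0, _ => []
  | w+1, m => m / 9^w :: msb w (m % 9^w)

-- LSB-first digits of m, width w (zero-padded)
def lsbFull : Nat → Nat → List Nat
  | 0, _ => []
  | w+1, m => m % 9 :: lsbFull w (m / 9)

-- LSB-first digits of m, no leading zeros (what B's while loop emits)
def lsbT (m : Nat) : List Nat :=
  if h : m = 0 then [] else m % 9 :: lsbT (m / 9)
termination_by m
decreasing_by exact Nat.div_lt_self (Nat.pos_of_ne_zero h) (by norm_num)

lemma toStr_digit (k : Nat) (h : k < 9) : PySem.Int.toStr (k : Int) = String.ofList [dChar k] := by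
  interval_cases k <;> decide

lemma dStr_toList (k : Nat) (h : k < 9) : (dStr k).toList = [swapC (dChar k)] := by
  interval_cases k <;> decide

lemma lsbFull_snoc (w m : Nat) : lsbFull (w+1) m = lsbFull w m ++ [m / 9^w % 9] := by
  induction w generalizing m with
  | zero => simp [lsbFull]
  | succ w ih =>
    show m % 9 :: lsbFull (w+1) (m / 9) = (m % 9 :: lsbFull w (m / 9)) ++ _
    rw [ih (m / 9)]
    simp [Nat.div_div_eq_div_mul, pow_succ, mul_comm]

lemma lsbFull_mod (w m : Nat) : lsbFull w (m % 9^w) = lsbFull w m := by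
  induction w generalizing m with
  | zero => rfl
  | succ w ih =>
    show (m % 9^(w+1)) % 9 :: lsbFull w (m % 9^(w+1) / 9) = m % 9 :: lsbFull w (m / 9)
    have h1 : m % 9^(w+1) % 9 = m % 9 :=
      Nat.mod_mod_of_dvd m (dvd_pow_self 9 (Nat.succ_ne_zero w))
    have h2 : m % 9^(w+1) / 9 = m / 9 % 9^w := by
      rw [pow_succ, mul_comm, Nat.mod_mul_right_div_self]
    rw [h1, h2, ih]

lemma msb_eq_rev_lsbFull (w m : Nat) (h : m < 9^w) : msb w m = (lsbFull w m).reverse := by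
  induction w generalizing m with
  | zero => rfl
  | succ w ih =>
    rw [lsbFull_snoc]
    show m / 9^w :: msb w (m % 9^w) = _
    rw [ih _ (Nat.mod_lt _ (by positivity))]
    rw [lsbFull_mod]
    have : m / 9^w % 9 = m / 9^w := Nat.mod_eq_of_lt (by
      rw [Nat.div_lt_iff_lt_mul (by positivity)]; calc m < 9^(w+1) := h
                                                       _ = 9 * 9^w := by ring)
    simp [this]

lemma lsbFull_zero (w : Nat) : lsbFull w 0 = List.replicate w 0 := by
  induction w with
  | zero => rfl
  | succ w ih => simp [lsbFull, ih, List.replicate_succ]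

lemma lsbT_pad (w m : Nat) (h : m < 9^w) :
    lsbT m ++ List.replicate (w - (lsbT m).length) 0 = lsbFull w m := by
  induction w generalizing m with
  | zero => interval_cases m; rw [lsbT]; rfl
  | succ w ih =>
    by_cases hm : m = 0
    · subst hm; rw [lsbT]; simp [lsbFull_zero]
    · rw [lsbT]; simp only [hm, dite_false]
      show (m % 9 :: lsbT (m / 9)) ++ _ = m % 9 :: lsbFull w (m / 9)
      have hd : m / 9 < 9^w := by
        rw [Nat.div_lt_iff_lt_mul (by norm_num)]
        calc m < 9^(w+1) := h
             _ = 9^w * 9 := pow_succ 9 w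
      rw [← ih _ hd]; simp [Nat.succ_sub_succ]

lemma length_lsbFull (w m : Nat) : (lsbFull w m).length = w := by
  induction w generalizing m with
  | zero => rfl
  | succ w ih => simp [lsbFull, ih]

lemma lsbT_lt (m k : Nat) (hk : k ∈ lsbT m) : k < 9 := by
  by_cases hm : m = 0
  · subst hm; rw [lsbT] at hk; simp at hk
  · rw [lsbT] at hk; simp only [hm, dite_false, List.mem_cons] at hk
    rcases hk with h | h
    · subst h; exact Nat.mod_lt _ (by norm_num)
    · exact lsbT_lt _ _ h
termination_by m
decreasing_by exact Nat.div_lt_self (Nat.pos_of_ne_zero hm) (by norm_num)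

lemma cal9_loop3 (l : List Char) (s : String) :
    l.foldl (fun (acc : String) (c : Char) => acc ++ String.ofList [c]) s
      = s ++ String.ofList l := by
  induction l generalizing s with
  | nil => simp
  | cons c l ih =>
    simp only [List.foldl_cons, ih]
    rw [String.append_assoc, ← String.ofList_append, List.singleton_append]

lemma altLoop_eq (m : Nat) : cal9AltLoop (m : Int) = (lsbT m).map dStr := by
  by_cases hm : m = 0
  · subst hm; rw [cal9AltLoop, lsbT]; simp
  · have hmod : PySem.Int.mod (m:Int) 9 = ((m % 9 : Nat) : Int) := by
      rw [PySem.Int.mod_eq_emod_of_pos (by norm_num)]; omega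
    have hdiv : PySem.Int.floordiv (m:Int) 9 = ((m / 9 : Nat) : Int) := by
      rw [PySem.Int.floordiv_eq_ediv_of_pos (by norm_num)]; omega
    rw [cal9AltLoop, lsbT]
    simp only [hm, dite_false, show (0:Int) < m from by positivity, dite_true, hmod, hdiv]
    rw [altLoop_eq (m / 9)]
    congr 1
    unfold dStr
    by_cases h8 : m % 9 = 8 <;> simp [h8]
    · intro hc; omega
termination_by m
decreasing_by exact Nat.div_lt_self (Nat.pos_of_ne_zero hm) (by norm_num)

lemma cal9_loop1 (w : Nat) (hw : w ≤ 20) (s : String) (m : Int) (h0 : 0 ≤ m)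
    (h : m.toNat < 9^w) :
    (PySem.List.pyRange (20 - (w:Int)) 20 1).foldl cal9Body1 (s, m)
      = (s ++ String.ofList ((msb w m.toNat).map dChar), 0) := by
  induction w generalizing s m with
  | zero =>
    rw [PySem.List.pyRange_one_eq_nil (by norm_num)]
    have : m = 0 := by omega
    subst this; simp [msb]
  | succ w ih =>
    obtain ⟨mn, rfl⟩ := Int.eq_ofNat_of_zero_le h0
    simp only [Int.toNat_natCast] at h ⊢
    have hcons : PySem.List.pyRange (20 - ((w+1:Nat):Int)) 20 1
        = (20 - ((w+1:Nat):Int)) :: PySem.List.pyRange (20 - (w:Int)) 20 1 := by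
      rw [PySem.List.pyRange_one_cons (by push_cast; omega)]
      congr 1; push_cast; ring
    rw [hcons, List.foldl_cons]
    have hexp : ((19:Int) - (20 - ((w+1:Nat):Int))).toNat = w := by push_cast; omega
    have hpow : ((9:Int) ^ w) = ((9^w : Nat) : Int) := by push_cast; ring
    have hdiv : PySem.Int.floordiv (mn : Int) ((9:Int) ^ w) = ((mn / 9^w : Nat) : Int) := by
      rw [hpow, PySem.Int.floordiv_natCast]
    have hmod : PySem.Int.mod (mn : Int) ((9:Int) ^ w) = ((mn % 9^w : Nat) : Int) := by
      rw [hpow, PySem.Int.mod_natCast]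
    have hdig : mn / 9^w < 9 := by
      rw [Nat.div_lt_iff_lt_mul (by positivity)]
      calc mn < 9^(w+1) := h
           _ = 9 * 9^w := by ring
    show (PySem.List.pyRange (20 - (w:Int)) 20 1).foldl cal9Body1
        (s ++ PySem.Int.toStr (PySem.Int.floordiv (mn : Int) ((9:Int) ^ ((19 - (20 - ((w+1:Nat):Int))).toNat))),
         PySem.Int.mod (mn : Int) ((9:Int) ^ ((19 - (20 - ((w+1:Nat):Int))).toNat))) = _
    rw [hexp, hdiv, hmod, toStr_digit _ hdig]
    rw [ih (by omega) _ _ (by positivity)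
      (by rw [Int.toNat_natCast]; exact Nat.mod_lt mn (by positivity))]
    show (s ++ String.ofList [dChar (mn / 9 ^ w)]
        ++ String.ofList ((msb w ((((mn % 9 ^ w : Nat) : Int)).toNat)).map dChar), 0) = _
    rw [Int.toNat_natCast]
    show _ = (s ++ String.ofList ((msb (w+1) mn).map dChar), 0)
    rw [String.append_assoc, ← String.ofList_append]
    rfl

lemma cal9_loop2 (pre suf : List Char) :
    (PySem.List.pyRange (pre.length : Int) ((pre.length + suf.length : Nat) : Int) 1).foldl
      cal9Body2 (pre ++ suf) = pre ++ suf.map swapC := by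
  induction suf generalizing pre with
  | nil => rw [PySem.List.pyRange_one_eq_nil (by simp)]; simp
  | cons c rest ih =>
    rw [PySem.List.pyRange_one_cons (by push_cast [List.length_cons]; omega)]
    rw [List.foldl_cons]
    have hget : PySem.List.pyGetD (pre ++ c :: rest) (pre.length : Int) ' ' = c := by
      rw [PySem.List.pyGetD_natCast]
      simp [List.getD]
    have hstep : cal9Body2 (pre ++ c :: rest) (pre.length : Int) = (pre ++ [swapC c]) ++ rest := by
      unfold cal9Body2
      rw [hget]
      unfold swapC
      by_cases h8 : c = '8' <;> simp [h8]
    rw [hstep]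
    have := ih (pre ++ [swapC c])
    simp only [List.length_append, List.length_cons] at this ⊢
    have harith : ((pre.length + (rest.length + 1) : Nat) : Int) = ((pre.length + 1 + rest.length : Nat) : Int) := by push_cast; ring
    have harith2 : ((pre.length : Int) + 1) = ((pre.length + 1 : Nat) : Int) := by push_cast; ring
    rw [harith, harith2]
    simpa using this

lemma join_dStr (l : List Nat) (h : ∀ k ∈ l, k < 9) :
    (PySem.Str.join "" (l.map dStr)).toList = l.map (fun k => swapC (dChar k)) := by
  rw [PySem.Str.toList_join]
  have : (l.map dStr).map String.toList = ((l.map (fun k => swapC (dChar k))).map (fun c => [c])) := by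
    simp only [List.map_map]
    exact List.map_congr_left (fun k hk => dStr_toList k (h k hk))
  rw [this]
  exact PySem.Chars.join_nil_singletons _

theorem main (n : Int) (hdom : -2147483648 ≤ n ∧ n ≤ 2147483648) :
    cal9 n = cal9_alt n := by
  have hp : (0:Int) < (9:Int)^(19:Nat) := by norm_num
  have hr0 : 0 ≤ PySem.Int.mod n ((9:Int)^(19:Nat)) := PySem.Int.mod_nonneg n hp
  have hrlt : PySem.Int.mod n ((9:Int)^(19:Nat)) < (9:Int)^(19:Nat) := PySem.Int.mod_lt n hp
  set rest := PySem.Int.mod n ((9:Int)^(19:Nat)) with hrestdef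
  set R := rest.toNat with hRdef
  have h9 : ((9^19 : Nat) : Int) = (9:Int)^(19:Nat) := by norm_cast
  have hRlt : R < 9^19 := by omega
  have hrR : rest = (R : Int) := by omega
  set high := PySem.Int.floordiv n ((9:Int)^(19:Nat)) with hhighdef
  set tl := (PySem.Int.toStr high).toList with htl
  set dcs := (msb 19 R).map dChar with hdcs
  -- the leading field is "0" or "-1" on Dom: the 8→5 pass leaves it unchanged
  have hhi : tl.map swapC = tl := by
    by_cases hn : 0 ≤ n
    · have h0 : high = 0 := by
        rw [hhighdef, PySem.Int.floordiv_eq_ediv_of_pos hp]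
        have h' : ((9:Int)^(19:Nat)) = 1350851717672992089 := by norm_num
        exact Int.ediv_eq_zero_of_lt hn (by omega)
      rw [htl, h0]; decide
    · have hn' : n < 0 := by omega
      have h1 : high = -1 := by
        rw [hhighdef, PySem.Int.floordiv_eq_iff_of_pos hp]
        have h' : ((9:Int)^(19:Nat)) = 1350851717672992089 := by norm_num
        constructor <;> omega
      rw [htl, h1]; decide
  have hcons : PySem.List.pyRange 0 20 1 = (0:Int) :: PySem.List.pyRange (20 - ((19:Nat):Int)) 20 1 := by
    rw [PySem.List.pyRange_one_cons (by norm_num)]; norm_num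
  have hstep0 : cal9Body1 ("", n) 0 = ("" ++ PySem.Int.toStr high, rest) := by
    unfold cal9Body1
    rw [show ((19:Int) - 0).toNat = (19:Nat) from by decide]
  have hloopA := cal9_loop1 19 (by norm_num) ("" ++ PySem.Int.toStr high) rest hr0
    (by rw [← hRdef]; exact hRlt)
  have hfold1 : (PySem.List.pyRange 0 20 1).foldl cal9Body1 ("", n)
      = ("" ++ PySem.Int.toStr high ++ String.ofList dcs, 0) := by
    rw [hcons, List.foldl_cons, hstep0, hloopA]
  have htmp9 : (("" ++ PySem.Int.toStr high ++ String.ofList dcs, (0:Int))).1.toList = tl ++ dcs := by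
    simp [htl]
  have hloop2 : (PySem.List.pyRange 0 (((tl ++ dcs).length : Nat) : Int) 1).foldl cal9Body2 (tl ++ dcs)
      = tl.map swapC ++ dcs.map swapC := by
    have h2 := cal9_loop2 [] (tl ++ dcs)
    simpa using h2
  have hthird := cal9_loop3 (tl.map swapC ++ dcs.map swapC) ""
  have hA : cal9 n = "" ++ String.ofList (tl.map swapC ++ dcs.map swapC) := by
    unfold cal9
    simp only [hfold1, htmp9, hloop2, hthird]
  -- B side
  have hBout : cal9AltLoop rest = (lsbT R).map dStr := by rw [hrR]; exact altLoop_eq R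
  have hlenT : (lsbT R).length ≤ 19 := by
    have hl := congrArg List.length (lsbT_pad 19 R hRlt)
    simp [length_lsbFull] at hl; omega
  have hmsb : msb 19 R = List.replicate (19 - (lsbT R).length) 0 ++ (lsbT R).reverse := by
    rw [msb_eq_rev_lsbFull 19 R hRlt, ← lsbT_pad 19 R hRlt]
    simp [List.reverse_append]
  have hmem : ∀ k ∈ (lsbT R).reverse, k < 9 := fun k hk => lsbT_lt R k (List.mem_reverse.mp hk)
  have hrev : ((lsbT R).map dStr).reverse = (lsbT R).reverse.map dStr := by
    rw [List.map_reverse]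
  have hpad : ((19 - ((((lsbT R).map dStr).length : Nat) : Int)).toNat) = 19 - (lsbT R).length := by
    simp only [List.length_map]; omega
  have hB : cal9_alt n = PySem.Int.toStr high
      ++ String.ofList (List.replicate (19 - (lsbT R).length) '0')
      ++ PySem.Str.join "" ((lsbT R).reverse.map dStr) := by
    unfold cal9_alt
    simp only [← hhighdef, ← hrestdef, hBout, hrev, hpad]
  rw [hA, hB, ← String.toList_inj]
  simp only [String.toList_append, String.toList_ofList]
  rw [join_dStr _ hmem, hhi, hdcs, hmsb]
  simp [List.map_replicate, show swapC (dChar 0) = '0' from by decide, List.map_map, Function.comp_def, htl]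

-- ===== VERDICT (by name: the statement is the Claim_ definition above) =====
theorem cal9_spec : Claim_equal_cal9 := by
  intro n hd
  have hdom : -2147483648 ≤ n ∧ n ≤ 2147483648 := by
    unfold Dom_cal9 pvDomInt at hd; simpa using hd
  show cal9 n = cal9_alt n
  exact main n hdom
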